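-- pv_equiv track=rewrite | github.com/akpj148/LabPertama_withKakakNoelGanteng | lab3.py | randomWord
-- ===== SOURCE A (Python) =====
-- def randomWord(yea):
--   words = {
--     1: "WALKING",
--     2: "PAN",
--     3: "HELLO"
--   }
--   while yea > len(words):
--     yea -=len(words)
--   return words[yea]
-- ===== SOURCE B (Python) =====
-- def randomWord(yea):
--     return ("WALKING", "PAN", "HELLO")[(yea - 1) % 3]
-- ===== Notes on version B (the rewrite author's own statement) =====
-- stated objective: faster
-- what changed: Replaces the repeated-subtraction while loop and dict lookup with a single modulo computation indexing a fixed tuple.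
-- outside the precondition, e.g. on randomWord(0): A raises KeyError, B returns 'HELLO'
import Mathlib
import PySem

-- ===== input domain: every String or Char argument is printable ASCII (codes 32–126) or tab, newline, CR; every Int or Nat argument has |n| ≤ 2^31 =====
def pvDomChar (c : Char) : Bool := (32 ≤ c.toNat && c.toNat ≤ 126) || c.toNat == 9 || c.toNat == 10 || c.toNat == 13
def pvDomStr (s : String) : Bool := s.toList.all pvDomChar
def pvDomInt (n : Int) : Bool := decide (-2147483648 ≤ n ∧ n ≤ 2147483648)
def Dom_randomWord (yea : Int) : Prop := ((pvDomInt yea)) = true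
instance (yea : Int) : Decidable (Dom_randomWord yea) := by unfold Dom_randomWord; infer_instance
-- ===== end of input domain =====

-- B replaces A's O(yea) repeated-subtraction loop + dict lookup by a single modulo index into a fixed tuple (faster, asymptotic).

-- ===== PORT A =====
-- the 'while yea > len(words): yea -= len(words)' loop (len(words) = 3)
def randomWordLoopA (yea : Int) : Int :=
  if yea > 3 then randomWordLoopA (yea - 3) else yea
termination_by yea.toNat
decreasing_by omega

def randomWord (yea : Int) : String :=
  let words : PySem.Dict Int String := PySem.Dict.ofList [(1, "WALKING"), (2, "PAN"), (3, "HELLO")]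
  let yea' := randomWordLoopA yea
  -- words[yea'] : KeyError (= none) is excluded by Pre_randomWord
  match words.get? yea' with
  | some s => s
  | none => ""

-- ===== PORT B =====
def randomWord_alt (yea : Int) : String :=
  ((PySem.List.pyGet? ["WALKING", "PAN", "HELLO"] (PySem.Int.mod (yea - 1) 3)).getD "")

-- ===== PRECONDITION & SPEC =====
-- A's dict has keys 1..3 and the loop only subtracts, so A raises KeyError for yea ≤ 0; excluded.
def Pre_randomWord (yea : Int) : Prop := 1 ≤ yea
instance (yea : Int) : Decidable (Pre_randomWord yea) := by unfold Pre_randomWord; infer_instance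
def pvWitness_randomWord : Int := (5)

def Spec_randomWord (yea : Int) (out : String) : Prop := out = randomWord_alt yea
instance (yea : Int) (out : String) : Decidable (Spec_randomWord yea out) := by unfold Spec_randomWord; infer_instance

-- ===== CLAIM (what is proved, stated in full; the proofs are below) =====
def Claim_equal_randomWord : Prop := ∀ (yea : Int), Dom_randomWord yea → Pre_randomWord yea → Spec_randomWord yea (randomWord yea)

-- ===== LEMMAS AND PROOFS =====

-- the loop computes ((yea - 1) mod 3) + 1 on the admitted domain
theorem randomWordLoopA_eq (yea : Int) (h : 1 ≤ yea) :
    randomWordLoopA yea = (yea - 1) % 3 + 1 := by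
  induction yea using randomWordLoopA.induct with
  | case1 y hy ih =>
    rw [randomWordLoopA, if_pos hy, ih (by omega)]
    omega
  | case2 y hy =>
    rw [randomWordLoopA, if_neg hy]
    omega

theorem randomWord_eq_alt (yea : Int) (h : 1 ≤ yea) :
    randomWord yea = randomWord_alt yea := by
  have hm : PySem.Int.mod (yea - 1) 3 = (yea - 1) % 3 :=
    PySem.Int.mod_eq_emod_of_pos (by omega)
  have h3 : (yea - 1) % 3 = 0 ∨ (yea - 1) % 3 = 1 ∨ (yea - 1) % 3 = 2 := by omega
  unfold randomWord randomWord_alt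
  rw [randomWordLoopA_eq yea h, hm]
  rcases h3 with h3 | h3 | h3 <;> rw [h3] <;> decide

-- ===== VERDICT (by name: the statement is the Claim_ definition above) =====
theorem randomWord_spec : Claim_equal_randomWord := by
  intro yea _ hpre
  exact randomWord_eq_alt yea hpre
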